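-- pv_equiv track=rewrite | github.com/Brunammsa/learning_python | geek_university/funcoes/lista5/questao_33.py | soma_algarismos
-- ===== SOURCE A (Python) =====
-- def soma_algarismos(n):
--     fatorial = 1
--     for i in range(n, 0, -1):
--         fatorial = fatorial * i
--     fatorial_str = str(fatorial)
--     soma_fatorial = 0
--     for i in fatorial_str:
--         soma_fatorial = soma_fatorial + int(i)
--     return soma_fatorial
-- ===== SOURCE B (Python) =====
-- def soma_algarismos(n):
--     f = 1
--     i = 2
--     while i <= n:
--         f = f * i
--         i = i + 1
--     total = 0
--     while f > 0:
--         total = total + f % 10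
--         f = f // 10
--     return total
-- ===== Notes on version B (the rewrite author's own statement) =====
-- stated objective: alternative
-- what changed: B builds the factorial with an ascending while loop and sums its digits arithmetically with repeated modulus and floor division by ten, instead of A's descending range loop followed by converting the factorial to a string and summing int(char) over its characters.
import Mathlib
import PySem

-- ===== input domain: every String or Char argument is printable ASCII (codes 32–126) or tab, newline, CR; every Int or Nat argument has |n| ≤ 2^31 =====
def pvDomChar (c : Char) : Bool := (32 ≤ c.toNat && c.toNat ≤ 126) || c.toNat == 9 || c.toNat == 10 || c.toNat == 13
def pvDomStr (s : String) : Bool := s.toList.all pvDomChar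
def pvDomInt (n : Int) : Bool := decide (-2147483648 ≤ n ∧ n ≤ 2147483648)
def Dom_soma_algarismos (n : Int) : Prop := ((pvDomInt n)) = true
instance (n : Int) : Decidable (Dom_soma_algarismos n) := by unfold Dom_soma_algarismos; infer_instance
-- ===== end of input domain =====

-- B sums the digits of n! arithmetically (repeated modulus and floor division by ten) over an ascending factorial loop,
-- instead of A's descending range loop plus string conversion; same cost class, different algorithm.

-- ===== PORT A =====
-- 'int(i)' is applied only to single characters of str(fatorial); fatorial ≥ 1, so every
-- character is a decimal digit and int() never raises — '(….getD 0)' is exact here.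
def soma_algarismos (n : Int) : Int :=
  let fatorial := (PySem.List.pyRange n 0 (-1)).foldl (fun f i => f * i) 1
  (PySem.Int.toChars fatorial).foldl
    (fun acc c => acc + (PySem.Int.ofChars? [c]).getD 0) 0

-- ===== PORT B =====
-- each while loop is ported with an exact fuel bound (structural recursion; the guard is the loop test)
def bFactAux : Nat → Int → Int → Int → Int
  | 0, _, _, f => f
  | fuel + 1, n, i, f => if i ≤ n then bFactAux fuel n (i + 1) (f * i) else f

def bFact (n i f : Int) : Int := bFactAux (n + 1 - i).toNat n i f

def bDigitsAux : Nat → Int → Int → Int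
  | 0, _, total => total
  | fuel + 1, f, total =>
    if 0 < f then bDigitsAux fuel (PySem.Int.floordiv f 10) (total + PySem.Int.mod f 10) else total

def bDigits (f total : Int) : Int := bDigitsAux f.toNat f total

def soma_algarismos_alt (n : Int) : Int :=
  bDigits (bFact n 2 1) 0

-- ===== PRECONDITION & SPEC =====
def Spec_soma_algarismos (n : Int) (out : Int) : Prop := out = soma_algarismos_alt n
instance (n : Int) (out : Int) : Decidable (Spec_soma_algarismos n out) := by unfold Spec_soma_algarismos; infer_instance

-- ===== CLAIM (what is proved, stated in full; the proofs are below) =====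
def Claim_equal_soma_algarismos : Prop := ∀ (n : Int), Dom_soma_algarismos n → Spec_soma_algarismos n (soma_algarismos n)

-- ===== LEMMAS AND PROOFS =====

-- value of int(c) for a digit character
theorem val_digitChar (d : Nat) (h : d < 10) :
    (PySem.Int.ofChars? [Nat.digitChar d]).getD 0 = (d : Int) := by
  interval_cases d <;> decide

-- A's factorial loop: descending product over pyRange n 0 (-1)
theorem descFold (k : Nat) : ∀ (n acc : Int), n.toNat = k →
    (PySem.List.pyRange n 0 (-1)).foldl (fun f i => f * i) acc = acc * (Nat.factorial k : Int) := by
  induction k with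
  | zero =>
    intro n acc h
    simp [PySem.List.pyRange_neg_one, h, Nat.factorial]
  | succ k ih =>
    intro n acc h
    rw [PySem.List.pyRange_neg_one_cons (by omega)]
    simp only [List.foldl_cons]
    rw [ih (n - 1) (acc * n) (by omega)]
    have hn : n = ((k : Int) + 1) := by omega
    rw [hn, Nat.factorial_succ]
    push_cast
    ring

-- product of k consecutive integers starting at i (proof-side helper for B's loop)
def segProd : Nat → Int → Int
  | 0, _ => 1
  | k + 1, i => i * segProd k (i + 1)

theorem segProd_succ_right (k : Nat) : ∀ (i : Int), segProd (k + 1) i = segProd k i * (i + k) := by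
  induction k with
  | zero => intro i; simp [segProd]
  | succ k ih =>
    intro i
    rw [show k + 1 + 1 = (k + 1) + 1 from rfl]
    rw [segProd, ih (i + 1), segProd]
    push_cast
    ring

theorem segProd_one (k : Nat) : segProd k 1 = (Nat.factorial k : Int) := by
  induction k with
  | zero => simp [segProd, Nat.factorial]
  | succ k ih =>
    rw [segProd_succ_right, ih, Nat.factorial_succ]
    push_cast
    ring

theorem bFactAux_eq_segProd (fuel : Nat) : ∀ (n i f : Int), (n + 1 - i).toNat ≤ fuel →
    bFactAux fuel n i f = f * segProd (n + 1 - i).toNat i := by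
  induction fuel with
  | zero =>
    intro n i f h
    have h0 : (n + 1 - i).toNat = 0 := by omega
    simp [bFactAux, h0, segProd]
  | succ fuel ih =>
    intro n i f h
    rw [bFactAux]
    by_cases hle : i ≤ n
    · simp only [hle, if_pos]
      rw [ih n (i + 1) (f * i) (by omega)]
      have hk : (n + 1 - i).toNat = (n + 1 - (i + 1)).toNat + 1 := by omega
      rw [hk, segProd]
      ring
    · have h0 : (n + 1 - i).toNat = 0 := by omega
      simp [hle, h0, segProd]

theorem bFact_eq_segProd (n i f : Int) :
    bFact n i f = f * segProd (n + 1 - i).toNat i := by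
  rw [bFact, bFactAux_eq_segProd _ n i f le_rfl]

theorem bFact_eq_factorial (n : Int) : bFact n 2 1 = (Nat.factorial n.toNat : Int) := by
  by_cases h : n ≤ 1
  · rw [bFact_eq_segProd, one_mul]
    have h0 : (n + 1 - 2).toNat = 0 := by omega
    rw [h0]
    have hb : n.toNat = 0 ∨ n.toNat = 1 := by omega
    rcases hb with hb | hb <;> rw [hb] <;> simp [segProd, Nat.factorial]
  · rw [bFact_eq_segProd, one_mul]
    have hk : (n + 1 - 2).toNat = (n - 1).toNat := by omega
    rw [hk]
    have hk : n.toNat = (n - 1).toNat + 1 := by omega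
    rw [hk, ← segProd_one ((n - 1).toNat + 1), segProd]
    norm_num

-- digit sums: the character side (A)
theorem toDigitsCore_sum (fuel : Nat) : ∀ (n : Nat) (ds : List Char), n < fuel →
    ((Nat.toDigitsCore 10 fuel n ds).map (fun c => (PySem.Int.ofChars? [c]).getD 0)).sum
      = ((Nat.digits 10 n).sum : Int)
        + (ds.map (fun c => (PySem.Int.ofChars? [c]).getD 0)).sum := by
  induction fuel with
  | zero => intro n ds h; omega
  | succ fuel ih =>
    intro n ds h
    rw [Nat.toDigitsCore]
    by_cases h0 : n / 10 = 0
    · have hn : n < 10 := by omega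
      simp only [h0, if_pos]
      by_cases hz : n = 0
      · subst hz; simp [val_digitChar 0 (by norm_num)]
      · rw [Nat.digits_def' (by norm_num) (by omega), h0]
        simp [Nat.mod_eq_of_lt hn, val_digitChar n hn]
    · simp only [h0, if_neg, not_false_iff]
      rw [ih (n / 10) (Nat.digitChar (n % 10) :: ds) (by omega)]
      rw [Nat.digits_def' (by norm_num) (by omega : 0 < n)]
      simp [val_digitChar (n % 10) (Nat.mod_lt _ (by norm_num))]
      ring

theorem charSum_eq_digitSum (m : Nat) :
    (PySem.Int.toChars (m : Int)).foldl
        (fun acc c => acc + (PySem.Int.ofChars? [c]).getD 0) 0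
      = ((Nat.digits 10 m).sum : Int) := by
  have h1 : PySem.Int.toChars (m : Int) = Nat.toDigits 10 m := by
    simp [PySem.Int.toChars]
  rw [h1, PySem.List.foldl_add, Nat.toDigits,
      toDigitsCore_sum (m + 1) m [] (by omega)]
  simp

-- digit sums: the arithmetic side (B)
theorem bDigitsAux_eq_digitSum (fuel : Nat) : ∀ (m : Nat) (t : Int), m ≤ fuel →
    bDigitsAux fuel (m : Int) t = t + ((Nat.digits 10 m).sum : Int) := by
  induction fuel with
  | zero =>
    intro m t h
    have h0 : m = 0 := by omega
    simp [bDigitsAux, h0]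
  | succ fuel ih =>
    intro m t h
    rw [bDigitsAux]
    by_cases hz : m = 0
    · subst hz; simp
    · have hpos : (0 : Int) < (m : Int) := by exact_mod_cast Nat.pos_of_ne_zero hz
      simp only [hpos, if_pos]
      have hfd : PySem.Int.floordiv (↑m) 10 = ((m / 10 : Nat) : Int) := by
        exact_mod_cast PySem.Int.floordiv_natCast m 10
      have hmd : PySem.Int.mod (↑m) 10 = ((m % 10 : Nat) : Int) := by
        exact_mod_cast PySem.Int.mod_natCast m 10
      rw [hfd, hmd, ih (m / 10) _ (by omega)]
      rw [Nat.digits_def' (by norm_num) (Nat.pos_of_ne_zero hz)]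
      simp only [List.sum_cons]
      push_cast
      ring

theorem bDigits_eq_digitSum (m : Nat) (t : Int) :
    bDigits (m : Int) t = t + ((Nat.digits 10 m).sum : Int) := by
  rw [bDigits, Int.toNat_natCast, bDigitsAux_eq_digitSum m m t le_rfl]

-- ===== VERDICT (by name: the statement is the Claim_ definition above) =====
theorem soma_algarismos_spec : Claim_equal_soma_algarismos := by
  intro n _
  unfold Spec_soma_algarismos soma_algarismos soma_algarismos_alt
  rw [descFold n.toNat n 1 rfl, one_mul, bFact_eq_factorial,
      charSum_eq_digitSum, bDigits_eq_digitSum, zero_add]
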